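-- pv_equiv track=rewrite | github.com/sissi8582-prog/hackathon | backend/app/recommend_prompt.py | _format_kb
-- ===== SOURCE A (Python) =====
-- from typing import List, Dict, Any
--
-- def _format_kb(chunks: List[Dict[str, Any]], max_chars: int = 4000) -> str:
--     if not chunks:
--         return "无"
--     parts: List[str] = []
--     total = 0
--     for c in chunks:
--         src = c.get("source", "")
--         txt = c.get("text", "")
--         block = f"[{src}] {txt}"
--         L = len(block)
--         if total + L > max_chars:
--             remaining = max_chars - total
--             if remaining > 100:
--                 parts.append(block[:remaining] + "...")
--                 total += remaining
--             break
--         parts.append(block)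
--         total += L
--     return "\n".join(parts) if parts else "无"
-- ===== SOURCE B (Python) =====
-- from typing import List, Dict, Any
--
-- def _format_kb(chunks: List[Dict[str, Any]], max_chars: int = 4000) -> str:
--     blocks = [f"[{c.get('source', '')}] {c.get('text', '')}" for c in chunks]
--     prefix = [0]
--     for b in blocks:
--         prefix.append(prefix[-1] + len(b))
--     k = len(blocks)
--     for i, p in enumerate(prefix[1:]):
--         if p > max_chars:
--             k = i
--             break
--     parts = blocks[:k]
--     if k < len(blocks):
--         remaining = max_chars - prefix[k]
--         if remaining > 100:
--             parts.append(blocks[k][:remaining] + "...")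
--     return "\n".join(parts) if parts else "无"
-- ===== Notes on version B (the rewrite author's own statement) =====
-- stated objective: alternative
-- what changed: Replaces A's single accumulate-and-break loop with a data-parallel decomposition: format all blocks, build a prefix-sum array of their lengths, locate the first overflowing index by scanning the prefix sums, take a slice of whole blocks and handle the one boundary block separately.
import Mathlib
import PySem

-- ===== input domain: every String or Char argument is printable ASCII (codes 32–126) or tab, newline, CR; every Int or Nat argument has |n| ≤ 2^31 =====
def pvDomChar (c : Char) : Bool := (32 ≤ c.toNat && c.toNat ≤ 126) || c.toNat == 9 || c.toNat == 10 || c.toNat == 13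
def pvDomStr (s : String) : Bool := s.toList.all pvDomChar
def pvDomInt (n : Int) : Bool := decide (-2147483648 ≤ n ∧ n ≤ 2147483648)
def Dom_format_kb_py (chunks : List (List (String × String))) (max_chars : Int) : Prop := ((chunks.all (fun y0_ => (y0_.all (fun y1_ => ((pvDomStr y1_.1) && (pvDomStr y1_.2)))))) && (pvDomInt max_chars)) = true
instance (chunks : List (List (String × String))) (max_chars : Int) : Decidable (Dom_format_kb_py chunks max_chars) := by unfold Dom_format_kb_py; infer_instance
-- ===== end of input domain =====

-- B formats all blocks up front, builds a pfx-sum array of their lengths, finds the first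
-- overflow index by scanning the pfx sums, and slices; A accumulates with a break. Same values,
-- different decomposition ("alternative"); no claim of speed.

-- ===== PORT A =====
-- f"[{src}] {txt}" ported as an empty-separator join (exact: concatenation of the pieces)
def fkBlockOf (c : List (String × String)) : String :=
  PySem.Str.join "" ["[", (PySem.Dict.mk c).getD "source" "", "] ", (PySem.Dict.mk c).getD "text" ""]

-- the for-loop of A, with its break, as structural recursion over the same state (parts, total)
def fkLoopA (max_chars : Int) : List (List (String × String)) → List String → Int → List String
  | [], parts, _ => parts
  | c :: rest, parts, total =>
    let block := fkBlockOf c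
    let L : Int := PySem.Str.len block
    if total + L > max_chars then
      let remaining := max_chars - total
      if remaining > 100 then
        parts ++ [PySem.Str.join "" [PySem.Str.slice block none (some remaining), "..."]]
      else parts
    else fkLoopA max_chars rest (parts ++ [block]) (total + L)

def format_kb_py (chunks : List (List (String × String))) (max_chars : Int) : String :=
  if chunks = [] then "无"
  else
    let parts := fkLoopA max_chars chunks [] 0
    if parts = [] then "无" else PySem.Str.join "\n" parts

-- ===== PORT B =====
-- pfx.append(pfx[-1] + len(b)) loop
def fkPrefixB (blocks : List String) : List Int :=
  blocks.foldl (fun acc b => acc ++ [PySem.List.pyGetD acc (-1) 0 + PySem.Str.len b]) [0]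

-- 'for i, p in enumerate(pfx[1:]): if p > max_chars: k = i; break' (none = no break, k stays len(blocks))
def fkScanB (max_chars : Int) : List Int → Nat → Option Nat
  | [], _ => none
  | p :: rest, i => if p > max_chars then some i else fkScanB max_chars rest (i + 1)

def format_kb_py_alt (chunks : List (List (String × String))) (max_chars : Int) : String :=
  let blocks := chunks.map fkBlockOf
  let pfx := fkPrefixB blocks
  let k := (fkScanB max_chars (pfx.drop 1) 0).getD blocks.length
  let parts := blocks.take k
  let parts :=
    if k < blocks.length then
      let remaining := max_chars - PySem.List.pyGetD pfx (k : Int) 0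
      if remaining > 100 then
        parts ++ [PySem.Str.join "" [PySem.Str.slice (PySem.List.pyGetD blocks (k : Int) "") none (some remaining), "..."]]
      else parts
    else parts
  if parts = [] then "无" else PySem.Str.join "\n" parts

-- ===== PRECONDITION & SPEC =====
def Spec_format_kb_py (chunks : List (List (String × String))) (max_chars : Int) (out : String) : Prop := out = format_kb_py_alt chunks max_chars
instance (chunks : List (List (String × String))) (max_chars : Int) (out : String) : Decidable (Spec_format_kb_py chunks max_chars out) := by unfold Spec_format_kb_py; infer_instance

-- ===== CLAIM (what is proved, stated in full; the proofs are below) =====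
def Claim_equal_format_kb_py : Prop := ∀ (chunks : List (List (String × String))) (max_chars : Int), Dom_format_kb_py chunks max_chars → Spec_format_kb_py chunks max_chars (format_kb_py chunks max_chars)

-- ===== LEMMAS AND PROOFS =====

-- common reference: the list of parts produced from the blocks starting at running total t
def fkSpec (mc : Int) : Int → List String → List String
  | _, [] => []
  | t, b :: rest =>
    let L : Int := PySem.Str.len b
    if t + L > mc then
      (if mc - t > 100 then [PySem.Str.join "" [PySem.Str.slice b none (some (mc - t)), "..."]] else [])
    else b :: fkSpec mc (t + L) rest

-- A's loop appends fkSpec of the remaining blocks to the accumulated parts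
lemma fkLoopA_eq_spec (mc : Int) (chunks : List (List (String × String)))
    (parts : List String) (t : Int) :
    fkLoopA mc chunks parts t = parts ++ fkSpec mc t (chunks.map fkBlockOf) := by
  induction chunks generalizing parts t with
  | nil => simp [fkLoopA, fkSpec]
  | cons c rest ih =>
    simp only [fkLoopA, fkSpec, List.map_cons]
    split_ifs with h1 h2 <;> simp [ih, List.append_assoc]

-- running pfx sums starting at t (the tail of B's pfx array)
def fkSums : Int → List String → List Int
  | _, [] => []
  | t, b :: rest => (t + PySem.Str.len b) :: fkSums (t + PySem.Str.len b) rest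

lemma fkPrefix_fold (blocks : List String) (init : List Int) (t : Int)
    (h : PySem.List.pyGetD init (-1) 0 = t) :
    blocks.foldl (fun acc b => acc ++ [PySem.List.pyGetD acc (-1) 0 + PySem.Str.len b]) init
      = init ++ fkSums t blocks := by
  induction blocks generalizing init t with
  | nil => simp [fkSums]
  | cons b rest ih =>
    simp only [List.foldl_cons, fkSums, h]
    rw [ih (init ++ [t + PySem.Str.len b]) (t + PySem.Str.len b)
        (PySem.List.pyGetD_neg_one_append_singleton ..)]
    simp

lemma fkPrefixB_eq (blocks : List String) :
    fkPrefixB blocks = 0 :: fkSums 0 blocks := by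
  unfold fkPrefixB
  rw [fkPrefix_fold blocks [0] 0 (by simp [PySem.List.pyGetD, PySem.List.pyGet?, PySem.List.pyIdx?])]
  simp

lemma fkScanB_shift (mc : Int) (l : List Int) (i : Nat) :
    fkScanB mc l (i + 1) = (fkScanB mc l i).map (· + 1) := by
  induction l generalizing i with
  | nil => simp [fkScanB]
  | cons p rest ih =>
    simp only [fkScanB]
    split_ifs <;> simp [ih]

-- B's core computation, from the blocks and the pfx array starting at t, equals fkSpec
lemma fkB_eq_spec (mc t : Int) (blocks : List String) :
    (let pfx := t :: fkSums t blocks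
     let k := (fkScanB mc (pfx.drop 1) 0).getD blocks.length
     let parts := blocks.take k
     if k < blocks.length then
       let remaining := mc - PySem.List.pyGetD pfx (k : Int) 0
       if remaining > 100 then
         parts ++ [PySem.Str.join "" [PySem.Str.slice (PySem.List.pyGetD blocks (k : Int) "") none (some remaining), "..."]]
       else parts
     else parts)
      = fkSpec mc t blocks := by
  induction blocks generalizing t with
  | nil => simp [fkSums, fkScanB, fkSpec]
  | cons b rest ih =>
    simp only [fkSums, fkSpec, List.drop_one, List.tail_cons, fkScanB]
    by_cases h1 : t + PySem.Str.len b > mc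
    · simp [PySem.List.pyGetD]
      split_ifs <;> simp_all
    · have hle : ¬ ((t + PySem.Str.len b) > mc) := h1
      simp only [hle, if_false]
      rw [fkScanB_shift mc (fkSums (t + PySem.Str.len b) rest) 0]
      have := ih (t + PySem.Str.len b)
      simp only [List.drop_one, List.tail_cons] at this
      cases hscan : fkScanB mc (fkSums (t + PySem.Str.len b) rest) 0 with
      | none =>
        rw [hscan] at this
        simp only [Option.map_none, Option.getD_none, List.length_cons]
        simp only [Option.getD_none] at this
        simpa using this
      | some j =>
        rw [hscan] at this
        simp only [Option.map_some, Option.getD_some, List.length_cons]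
        simp only [Option.getD_some] at this
        have hcast : ((j + 1 : Nat) : Int) = (j : Int) + 1 := by push_cast; ring
        simp only [List.take_succ_cons, PySem.List.pyGetD_natCast,
          List.getD_cons_succ, Nat.add_lt_add_iff_right]
        simp only [PySem.List.pyGetD_natCast] at this
        rw [← this]
        split_ifs <;> simp

-- ===== VERDICT (by name: the statement is the Claim_ definition above) =====
theorem format_kb_py_spec : Claim_equal_format_kb_py := by
  intro chunks max_chars _
  unfold Spec_format_kb_py format_kb_py format_kb_py_alt
  have hB := fkB_eq_spec max_chars 0 (chunks.map fkBlockOf)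
  simp only [fkPrefixB_eq, List.length_map]
  simp only [List.length_map] at hB
  rw [hB]
  by_cases h : chunks = []
  · subst h; simp [fkSpec]
  · rw [if_neg h, fkLoopA_eq_spec, List.nil_append]
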